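-- pv_equiv track=rewrite | github.com/Na58/NLP | COMP90042-Submission/Code-V5.0-Final/NER.py | retag_date
-- ===== SOURCE A (Python) =====
-- def retag_date(tagged_entity):
--     ###gather NUMBER MONTH YEAR pattern into DATE###
--     result_entity = []
--     i = 0
--     while i < len(tagged_entity) - 2:
--         (token1, tag1) = tagged_entity[i]
--
--         if tag1 == 'NUMBER':
--             (token2, tag2) = tagged_entity[i+1]
--             if tag2 == 'MONTH':
--                 (token3, tag3) = tagged_entity[i+2]
--                 if tag3 == 'YEAR':
--                     result_entity.append((token1,'DATE'))
--                     result_entity.append((token2, 'DATE'))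
--                     result_entity.append((token3, 'DATE'))
--                     i = i + 3
--                     continue
--         elif tag1 == 'MONTH':
--             (token2, tag2) = tagged_entity[i+1]
--             if tag2 == 'NUMBER':
--                 (token3, tag3) = tagged_entity[i+2]
--                 if tag3 == 'YEAR':
--                     result_entity.append((token1,'DATE'))
--                     result_entity.append((token2, 'DATE'))
--                     result_entity.append((token3, 'DATE'))
--                     i = i + 3
--                     continue
--         result_entity.append((token1, tag1))
--         i += 1
--     for counter in range(len(tagged_entity) - i):
--         result_entity.append(tagged_entity[i + counter])
--
--     return result_entity
-- ===== SOURCE B (Python) =====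
-- def retag_date(tagged_entity):
--     # pass 1: greedy scan collecting the indices of matched NUMBER/MONTH/YEAR triples
--     n = len(tagged_entity)
--     date_idx = set()
--     i = 0
--     while i < n - 2:
--         t1 = tagged_entity[i][1]
--         t2 = tagged_entity[i + 1][1]
--         t3 = tagged_entity[i + 2][1]
--         if t3 == 'YEAR' and ((t1 == 'NUMBER' and t2 == 'MONTH') or
--                              (t1 == 'MONTH' and t2 == 'NUMBER')):
--             date_idx.update((i, i + 1, i + 2))
--             i += 3
--         else:
--             i += 1
--     # pass 2: uniform rebuild
--     return [(tok, 'DATE') if idx in date_idx else (tok, tag)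
--             for idx, (tok, tag) in enumerate(tagged_entity)]
-- ===== Notes on version B (the rewrite author's own statement) =====
-- stated objective: alternative
-- what changed: A's single variable-stride loop that emits output as it scans is split into two passes: a greedy detection pass that only collects the index set of matched triples, and a uniform enumerate-map pass that rebuilds the whole list from that set.
import Mathlib
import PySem

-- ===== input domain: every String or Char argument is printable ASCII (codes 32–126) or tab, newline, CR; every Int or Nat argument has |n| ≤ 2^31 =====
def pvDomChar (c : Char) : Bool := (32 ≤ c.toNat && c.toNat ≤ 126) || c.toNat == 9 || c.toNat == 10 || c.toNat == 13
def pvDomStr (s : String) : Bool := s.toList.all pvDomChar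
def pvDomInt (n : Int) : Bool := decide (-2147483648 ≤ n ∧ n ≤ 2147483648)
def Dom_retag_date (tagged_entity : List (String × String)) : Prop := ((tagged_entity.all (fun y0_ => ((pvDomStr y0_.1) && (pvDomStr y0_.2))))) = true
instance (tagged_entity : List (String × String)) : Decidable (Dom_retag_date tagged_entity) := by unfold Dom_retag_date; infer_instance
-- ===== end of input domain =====

-- B re-decomposes A's single emit-as-you-scan greedy loop into two passes (greedy index detection, then a uniform enumerate-map rebuild); same behaviour, same O(n) cost.

-- ===== PORT A =====
-- A's while loop: index i, result_entity accumulator; the trailing for-loop copies the rest.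
def retagALoop (xs : List (String × String)) (i : Nat) (acc : List (String × String)) :
    List (String × String) :=
  if _h : i < xs.length - 2 then
    let p1 := xs.getD i ("", "")
    if p1.2 == "NUMBER" then
      let p2 := xs.getD (i+1) ("", "")
      if p2.2 == "MONTH" then
        let p3 := xs.getD (i+2) ("", "")
        if p3.2 == "YEAR" then
          retagALoop xs (i+3) (acc ++ [(p1.1, "DATE"), (p2.1, "DATE"), (p3.1, "DATE")])
        else
          retagALoop xs (i+1) (acc ++ [(p1.1, p1.2)])
      else
        retagALoop xs (i+1) (acc ++ [(p1.1, p1.2)])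
    else if p1.2 == "MONTH" then
      let p2 := xs.getD (i+1) ("", "")
      if p2.2 == "NUMBER" then
        let p3 := xs.getD (i+2) ("", "")
        if p3.2 == "YEAR" then
          retagALoop xs (i+3) (acc ++ [(p1.1, "DATE"), (p2.1, "DATE"), (p3.1, "DATE")])
        else
          retagALoop xs (i+1) (acc ++ [(p1.1, p1.2)])
      else
        retagALoop xs (i+1) (acc ++ [(p1.1, p1.2)])
    else
      retagALoop xs (i+1) (acc ++ [(p1.1, p1.2)])
  else
    (List.range (xs.length - i)).foldl (fun a c => a ++ [xs.getD (i + c) ("", "")]) acc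
termination_by xs.length - i
decreasing_by all_goals omega


def retag_date (tagged_entity : List (String × String)) : List (String × String) :=
  retagALoop tagged_entity 0 []

-- ===== PORT B =====
-- pass 1 of Source B: the greedy scan collecting matched indices into a set
def tripleMatch (xs : List (String × String)) (i : Nat) : Bool :=
  let t1 := (xs.getD i ("", "")).2
  let t2 := (xs.getD (i+1) ("", "")).2
  let t3 := (xs.getD (i+2) ("", "")).2
  t3 == "YEAR" && ((t1 == "NUMBER" && t2 == "MONTH") || (t1 == "MONTH" && t2 == "NUMBER"))

def retagBDetect (xs : List (String × String)) (i : Nat) (s : PySem.Set Int) : PySem.Set Int :=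
  if i < xs.length - 2 then
    if tripleMatch xs i then
      retagBDetect xs (i+3) (((s.add (i : Int)).add ((i : Int) + 1)).add ((i : Int) + 2))
    else
      retagBDetect xs (i+1) s
  else s
termination_by xs.length - i
decreasing_by all_goals omega

-- pass 2 of Source B: the uniform rebuild over enumerate(tagged_entity)
def retag_date_alt (tagged_entity : List (String × String)) : List (String × String) :=
  let dateIdx := retagBDetect tagged_entity 0 (PySem.Set.ofList [])
  (PySem.List.enumerate tagged_entity).map
    (fun q => if dateIdx.contains q.1 then (q.2.1, "DATE") else q.2)

-- ===== PRECONDITION & SPEC =====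
def Spec_retag_date (tagged_entity : List (String × String)) (out : List (String × String)) : Prop := out = retag_date_alt tagged_entity
instance (tagged_entity : List (String × String)) (out : List (String × String)) : Decidable (Spec_retag_date tagged_entity out) := by unfold Spec_retag_date; infer_instance

-- ===== CLAIM (what is proved, stated in full; the proofs are below) =====
def Claim_equal_retag_date : Prop := ∀ (tagged_entity : List (String × String)), Dom_retag_date tagged_entity → Spec_retag_date tagged_entity (retag_date tagged_entity)

-- ===== LEMMAS AND PROOFS =====
theorem enum_fst_ge {α : Type} (l : List α) (k : Int) (q : Int × α)
    (h : q ∈ PySem.List.enumerate l k) : k ≤ q.1 := by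
  induction l generalizing k with
  | nil => simp [PySem.List.enumerate] at h
  | cons x t ih =>
    simp only [PySem.List.enumerate, List.mem_cons] at h
    rcases h with h | h
    · simp [h]
    · have := ih (k+1) h; omega

theorem map_getD_range (xs : List (String × String)) (i : Nat) :
    (List.range (xs.length - i)).map (fun c => xs.getD (i + c) ("", "")) = xs.drop i := by
  apply List.ext_getElem
  · simp
  · intro k h1 h2
    simp only [List.getElem_map, List.getElem_range, List.getElem_drop]
    rw [List.getD_eq_getElem]


theorem detect_lb (xs : List (String × String)) (i : Nat) (s : PySem.Set Int) (j : Int)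
    (hj : j ∈ retagBDetect xs i s) : j ∈ s ∨ (i : Int) ≤ j := by
  rw [retagBDetect] at hj
  by_cases h : i < xs.length - 2
  · rw [if_pos h] at hj
    split at hj
    · rcases detect_lb xs (i+3) _ j hj with h' | h'
      · simp only [PySem.Set.mem_add] at h'
        rcases h' with ((h'|h')|h')|h' <;> first | exact Or.inl h' | (right; omega)
      · right; push_cast at h' ⊢; omega
    · rcases detect_lb xs (i+1) s j hj with h' | h'
      · exact Or.inl h'
      · right; push_cast at h' ⊢; omega
  · rw [if_neg h] at hj; exact Or.inl hj
termination_by xs.length - i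
decreasing_by all_goals omega


theorem detect_mem (xs : List (String × String)) (i : Nat) (s : PySem.Set Int) (j : Int) :
    j ∈ retagBDetect xs i s ↔ j ∈ s ∨ j ∈ retagBDetect xs i (PySem.Set.ofList []) := by
  have e : ∀ s' : PySem.Set Int, retagBDetect xs i s' =
      if i < xs.length - 2 then
        (if tripleMatch xs i then
          retagBDetect xs (i+3) (((s'.add (i : Int)).add ((i : Int) + 1)).add ((i : Int) + 2))
        else retagBDetect xs (i+1) s')
      else s' := fun s' => by rw [retagBDetect]
  rw [e s, e (PySem.Set.ofList [])]
  by_cases h : i < xs.length - 2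
  · rw [if_pos h, if_pos h]
    by_cases hm : tripleMatch xs i
    · rw [if_pos hm, if_pos hm]
      rw [detect_mem xs (i+3), detect_mem xs (i+3) ((((PySem.Set.ofList []).add _).add _).add _)]
      simp only [PySem.Set.mem_add, PySem.Set.mem_ofList, List.not_mem_nil, false_or]
      tauto
    · rw [if_neg hm, if_neg hm]
      rw [detect_mem xs (i+1) s]
  · rw [if_neg h, if_neg h]
    simp
termination_by xs.length - i
decreasing_by all_goals omega

def markF (xs : List (String × String)) (i : Nat) : Int × (String × String) → String × String :=
  fun q => if (retagBDetect xs i (PySem.Set.ofList [])).contains q.1 then (q.2.1, "DATE") else q.2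

theorem loop_eq (xs : List (String × String)) (i : Nat) (acc : List (String × String)) :
    retagALoop xs i acc = acc ++ (PySem.List.enumerate (xs.drop i) i).map (markF xs i) := by
  by_cases h : i < xs.length - 2
  · have h0 : i < xs.length := by omega
    have h1 : i + 1 < xs.length := by omega
    have h2 : i + 2 < xs.length := by omega
    have hg0 : xs.getD i ("", "") = xs[i] := List.getD_eq_getElem xs ("", "") h0
    have hg1 : xs.getD (i+1) ("", "") = xs[i+1] := List.getD_eq_getElem xs ("", "") h1
    have hg2 : xs.getD (i+2) ("", "") = xs[i+2] := List.getD_eq_getElem xs ("", "") h2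
    have hcast1 : (i : Int) + 1 = ((i+1 : Nat) : Int) := by push_cast; ring
    have hcast3 : (i : Int) + 1 + 1 + 1 = ((i+3 : Nat) : Int) := by push_cast; ring
    by_cases hm : tripleMatch xs i = true
    · -- matched triple: both step by 3
      have hdet : retagBDetect xs i (PySem.Set.ofList []) =
          retagBDetect xs (i+3)
            (((((PySem.Set.ofList []).add (i : Int))).add ((i : Int) + 1)).add ((i : Int) + 2)) := by
        rw [retagBDetect, if_pos h, if_pos hm]
      have hmem : ∀ k : Int, k = (i : Int) ∨ k = (i : Int) + 1 ∨ k = (i : Int) + 2 →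
          k ∈ retagBDetect xs i (PySem.Set.ofList []) := by
        intro k hk
        rw [hdet, detect_mem]
        left
        simp only [PySem.Set.mem_add, PySem.Set.mem_ofList, List.not_mem_nil, false_or]
        tauto
      have hmap : (PySem.List.enumerate (xs.drop (i+3)) ((i+3 : Nat) : Int)).map (markF xs i)
          = (PySem.List.enumerate (xs.drop (i+3)) ((i+3 : Nat) : Int)).map (markF xs (i+3)) := by
        apply List.map_congr_left
        intro q hq
        have hge := enum_fst_ge _ _ _ hq
        have hiff : q.1 ∈ retagBDetect xs i (PySem.Set.ofList []) ↔
            q.1 ∈ retagBDetect xs (i+3) (PySem.Set.ofList []) := by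
          rw [hdet, detect_mem]
          simp only [PySem.Set.mem_add, PySem.Set.mem_ofList, List.not_mem_nil, false_or]
          constructor
          · rintro (((h'|h')|h') | h') <;>
              first | (exfalso; push_cast at hge; omega) | exact h'
          · exact Or.inr
        have hc : (retagBDetect xs i (PySem.Set.ofList [])).contains q.1
            = (retagBDetect xs (i+3) (PySem.Set.ofList [])).contains q.1 := by
          rw [Bool.eq_iff_iff]; simp only [PySem.Set.contains, List.contains_iff_mem]; exact hiff
        unfold markF
        rw [hc]
      have hstep : retagALoop xs i acc =
          retagALoop xs (i+3) (acc ++ [(xs[i].1, "DATE"), (xs[i+1].1, "DATE"), (xs[i+2].1, "DATE")]) := by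
        simp only [tripleMatch, hg0, hg1, hg2, Bool.and_eq_true, Bool.or_eq_true, beq_iff_eq] at hm
        rw [retagALoop, dif_pos h]
        simp only [hg0, hg1, hg2]
        rcases hm with ⟨h3, ⟨ha1, ha2⟩ | ⟨hb1, hb2⟩⟩
        · simp [ha1, ha2, h3]
        · simp [hb1, hb2, h3]
      have hd : xs.drop i = xs[i] :: xs[i+1] :: xs[i+2] :: xs.drop (i+3) := by
        have d2 : List.drop (i+1+1) xs = List.drop (i+2) xs := by
          have e1 : i+1+1 = i+2 := by omega
          rw [e1]
        have d3 : List.drop (i+2+1) xs = List.drop (i+3) xs := by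
          have e2 : i+2+1 = i+3 := by omega
          rw [e2]
        rw [List.drop_eq_getElem_cons h0, List.drop_eq_getElem_cons h1, d2,
            List.drop_eq_getElem_cons h2, d3]
      have hF0 : markF xs i ((i : Int), xs[i]) = (xs[i].1, "DATE") := by
        unfold markF
        rw [if_pos (show (retagBDetect xs i (PySem.Set.ofList [])).contains (i : Int) = true by
          simp only [PySem.Set.contains, List.contains_iff_mem]; exact hmem _ (Or.inl rfl))]
      have hF1 : markF xs i ((i : Int)+1, xs[i+1]) = (xs[i+1].1, "DATE") := by
        unfold markF
        rw [if_pos (show (retagBDetect xs i (PySem.Set.ofList [])).contains ((i : Int)+1) = true by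
          simp only [PySem.Set.contains, List.contains_iff_mem]; exact hmem _ (Or.inr (Or.inl rfl)))]
      have hF2 : markF xs i ((i : Int)+1+1, xs[i+2]) = (xs[i+2].1, "DATE") := by
        have he : (i : Int)+1+1 = (i : Int)+2 := by ring
        unfold markF
        rw [he, if_pos (show (retagBDetect xs i (PySem.Set.ofList [])).contains ((i : Int)+2) = true by
          simp only [PySem.Set.contains, List.contains_iff_mem]; exact hmem _ (Or.inr (Or.inr rfl)))]
      rw [hstep, loop_eq xs (i+3), hd]
      simp only [PySem.List.enumerate, List.map_cons]
      rw [hcast3, ← hmap, hF0, hF1, hF2]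
      simp
    · -- no match at i: both step by 1
      have hdet : retagBDetect xs i (PySem.Set.ofList []) =
          retagBDetect xs (i+1) (PySem.Set.ofList []) := by
        rw [retagBDetect, if_pos h, if_neg hm]
      have hhead : markF xs i ((i : Int), xs[i]) = xs[i] := by
        unfold markF
        have hn : ¬ ((i : Int) ∈ retagBDetect xs i (PySem.Set.ofList [])) := by
          rw [hdet]
          intro hc
          rcases detect_lb xs (i+1) _ _ hc with h' | h'
          · simp at h'
          · push_cast at h'; omega
        rw [if_neg (show ¬ (retagBDetect xs i (PySem.Set.ofList [])).contains (i : Int) = true by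
          simp only [PySem.Set.contains, List.contains_iff_mem]; exact hn)]
      have hstep : retagALoop xs i acc = retagALoop xs (i+1) (acc ++ [(xs[i].1, xs[i].2)]) := by
        simp only [tripleMatch, hg0, hg1, hg2, Bool.and_eq_true, Bool.or_eq_true, beq_iff_eq] at hm
        push Not at hm
        rw [retagALoop, dif_pos h]
        simp only [hg0, hg1, hg2]
        split_ifs with c1 c2 c3 c4 c5 c6 <;> simp_all
      have hmf : markF xs i = markF xs (i+1) := by unfold markF; rw [hdet]
      rw [hstep, loop_eq xs (i+1), List.drop_eq_getElem_cons h0]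
      simp only [PySem.List.enumerate, List.map_cons]
      rw [hcast1, ← hmf, hhead]
      simp
  · rw [retagALoop, dif_neg h, PySem.List.foldl_append_singleton_eq_map, map_getD_range]
    have hdet : retagBDetect xs i (PySem.Set.ofList []) = PySem.Set.ofList [] := by
      rw [retagBDetect, if_neg h]
    have hq : ∀ q ∈ PySem.List.enumerate (List.drop i xs) (i : Int), markF xs i q = q.2 := by
      intro q _
      unfold markF
      rw [hdet, if_neg (by simp [PySem.Set.ofList, PySem.Set.contains])]
    rw [List.map_congr_left hq, PySem.List.map_snd_enumerate]
termination_by xs.length - i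
decreasing_by all_goals omega

-- ===== VERDICT (by name: the statement is the Claim_ definition above) =====
theorem retag_date_spec : Claim_equal_retag_date := by
  intro xs _
  unfold Spec_retag_date retag_date retag_date_alt
  exact loop_eq xs 0 []
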